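-- pv_equiv track=rewrite | github.com/IvanAAlekseev/config_u | main.py | find_package_block
-- ===== SOURCE A (Python) =====
-- def find_package_block(content, package_name):
--     """Ищет блок с описанием пакета в содержимом файла"""
--     lines = content.split('\n')
--     in_target_package = False
--     package_block = []
--
--     for line in lines:
--         if line.startswith('Package: ') and package_name in line:
--             in_target_package = True
--             package_block.append(line)
--         elif line.startswith('Package: ') and in_target_package:
--             # Нашли следующий пакет - заканчиваем
--             break
--         elif in_target_package:
--             package_block.append(line)
--
--     return '\n'.join(package_block) if package_block else None
-- ===== SOURCE B (Python) =====
-- def find_package_block(content, package_name):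
--     """Ищет блок с описанием пакета в содержимом файла"""
--     lines = content.split('\n')
--
--     def is_start(line):
--         return line.startswith('Package: ') and package_name in line
--
--     def is_term(line):
--         return line.startswith('Package: ') and package_name not in line
--
--     start = next((i for i, line in enumerate(lines) if is_start(line)), None)
--     if start is None:
--         return None
--     tail = lines[start + 1:]
--     off = next((j for j, line in enumerate(tail) if is_term(line)), len(tail))
--     return '\n'.join(lines[start:start + 1 + off])
-- ===== Notes on version B (the rewrite author's own statement) =====
-- stated objective: simpler
-- what changed: B replaces A's stateful flag-and-accumulator loop with index arithmetic: find the first matching 'Package: ' line, find the first terminating 'Package: ' line after it, and return the joined slice between them.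
import Mathlib
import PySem

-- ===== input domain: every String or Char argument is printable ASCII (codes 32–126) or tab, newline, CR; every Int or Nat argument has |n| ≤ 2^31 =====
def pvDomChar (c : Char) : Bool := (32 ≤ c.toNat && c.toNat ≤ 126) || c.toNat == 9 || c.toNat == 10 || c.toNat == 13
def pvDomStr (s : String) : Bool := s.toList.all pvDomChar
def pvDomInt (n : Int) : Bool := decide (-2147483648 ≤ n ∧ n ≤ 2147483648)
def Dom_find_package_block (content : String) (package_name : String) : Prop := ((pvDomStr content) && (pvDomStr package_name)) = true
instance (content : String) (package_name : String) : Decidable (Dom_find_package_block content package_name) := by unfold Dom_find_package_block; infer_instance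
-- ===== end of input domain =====

-- B changes the decomposition only: A's stateful flag loop becomes "find start index, find end index, join the slice"; same O(n) cost.

-- ===== PORT A =====
-- the for-loop of A: state = (in_target_package, package_block); break = return acc
def pvGoA (pn : String) : List String → Bool → List String → List String
  | [], _, acc => acc
  | l :: rest, inT, acc =>
    if PySem.Str.startswith l "Package: " && PySem.Str.isIn pn l then
      pvGoA pn rest true (acc ++ [l])
    else if PySem.Str.startswith l "Package: " && inT then
      acc
    else if inT then
      pvGoA pn rest inT (acc ++ [l])
    else
      pvGoA pn rest inT acc

def find_package_block (content : String) (package_name : String) : Option String :=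
  let lines := (PySem.Str.split? content "\n").getD []
  let package_block := pvGoA package_name lines false []
  if package_block.isEmpty then none else some (PySem.Str.join "\n" package_block)

-- ===== PORT B =====
def pvIsStart (pn l : String) : Bool := PySem.Str.startswith l "Package: " && PySem.Str.isIn pn l
def pvIsTerm (pn l : String) : Bool := PySem.Str.startswith l "Package: " && !PySem.Str.isIn pn l

def find_package_block_alt (content : String) (package_name : String) : Option String :=
  let lines := (PySem.Str.split? content "\n").getD []
  match List.findIdx? (pvIsStart package_name) lines with
  | none => none
  | some start =>
    let tail := lines.drop (start + 1)
    let off := (List.findIdx? (pvIsTerm package_name) tail).getD tail.length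
    some (PySem.Str.join "\n" (List.take (off + 1) (lines.drop start)))

-- ===== PRECONDITION & SPEC =====
def Spec_find_package_block (content : String) (package_name : String) (out : Option String) : Prop := out = find_package_block_alt content package_name
instance (content : String) (package_name : String) (out : Option String) : Decidable (Spec_find_package_block content package_name out) := by unfold Spec_find_package_block; infer_instance

-- ===== CLAIM (what is proved, stated in full; the proofs are below) =====
def Claim_equal_find_package_block : Prop := ∀ (content : String) (package_name : String), Dom_find_package_block content package_name → Spec_find_package_block content package_name (find_package_block content package_name)

-- ===== LEMMAS AND PROOFS =====

-- once in_target_package is set, A appends every line until the first terminating 'Package: ' line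
theorem pvGoA_true (pn : String) : ∀ (ls acc : List String),
    pvGoA pn ls true acc = acc ++ ls.takeWhile (fun l => !pvIsTerm pn l) := by
  intro ls
  induction ls with
  | nil => intro acc; simp [pvGoA]
  | cons l rest ih =>
    intro acc
    by_cases hs : PySem.Chars.startswith l.toList ['P', 'a', 'c', 'k', 'a', 'g', 'e', ':', ' '] = true
    · by_cases hi : PySem.Chars.isIn pn.toList l.toList = true
      · simp [pvGoA, hs, hi, pvIsTerm, ih]
      · simp [pvGoA, hs, hi, pvIsTerm]
    · simp [pvGoA, hs, pvIsTerm, ih]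

-- taking up to the first index satisfying p (or the whole list) is takeWhile (¬ p)
theorem pvTake_findIdx {α : Type} (p : α → Bool) : ∀ (ls : List α),
    List.take ((List.findIdx? p ls).getD ls.length) ls = ls.takeWhile (fun l => !p l) := by
  intro ls
  induction ls with
  | nil => simp
  | cons l rest ih =>
    by_cases hp : p l = true
    · simp [List.findIdx?_cons, hp]
    · simp [List.findIdx?_cons, hp]
      cases h : List.findIdx? p rest with
      | none => simpa [h] using ih
      | some j => simpa [h] using ih

-- the list-level equivalence, by induction over the leading non-matching lines
theorem pvCore (pn : String) : ∀ (ls : List String),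
    (let blk := pvGoA pn ls false [];
     if blk.isEmpty then none else some (PySem.Str.join "\n" blk)) =
    (match List.findIdx? (pvIsStart pn) ls with
     | none => none
     | some start =>
       let tail := ls.drop (start + 1)
       let off := (List.findIdx? (pvIsTerm pn) tail).getD tail.length
       some (PySem.Str.join "\n" (List.take (off + 1) (ls.drop start)))) := by
  intro ls
  induction ls with
  | nil => simp [pvGoA]
  | cons l rest ih =>
    by_cases hm : pvIsStart pn l = true
    · have hgo : pvGoA pn (l :: rest) false [] =
          l :: rest.takeWhile (fun x => !pvIsTerm pn x) := by
        have hb : (PySem.Str.startswith l "Package: " && PySem.Str.isIn pn l) = true := hm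
        simp only [pvGoA, hb]
        simpa using pvGoA_true pn rest [l]
      simp only [List.findIdx?_cons, hm]
      simp [hgo, pvTake_findIdx]
    · have hgo : pvGoA pn (l :: rest) false [] = pvGoA pn rest false [] := by
        simp only [pvIsStart] at hm
        by_cases h1 : PySem.Chars.startswith l.toList ['P', 'a', 'c', 'k', 'a', 'g', 'e', ':', ' '] = true
        · have h2 : PySem.Chars.isIn pn.toList l.toList = false := by
            simp [h1] at hm; simpa using hm
          simp [pvGoA, h1, h2]
        · simp [pvGoA, h1]
      simp only [List.findIdx?_cons, hm]
      rw [hgo]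
      cases h : List.findIdx? (pvIsStart pn) rest with
      | none => simpa [h] using ih
      | some j => simpa [h] using ih

-- ===== VERDICT (by name: the statement is the Claim_ definition above) =====
theorem find_package_block_spec : Claim_equal_find_package_block := by
  intro content package_name _
  unfold Spec_find_package_block find_package_block find_package_block_alt
  simpa [pvIsStart] using pvCore package_name ((PySem.Str.split? content "\n").getD [])
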